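-- pv_equiv track=rewrite | github.com/maranedah/chilean-seismic-marine-lines | src/scraper/pangaea.py | _split_tab_lines
-- ===== SOURCE A (Python) =====
-- from typing import Optional
--
-- def _split_tab_lines(lines: list[str]) -> tuple[list[str], Optional[str], list[str]]:
--     """Split raw tab-file lines into (meta_lines, header_line, data_lines)."""
--     meta_lines: list[str] = []
--     header_line: Optional[str] = None
--     data_lines: list[str] = []
--     in_meta = True
--
--     for line in lines:
--         if in_meta:
--             if line.strip() == "*/":
--                 in_meta = False
--             else:
--                 meta_lines.append(line)
--         elif header_line is None:
--             if line.strip():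
--                 header_line = line  # first non-empty line after */ is the column header
--         else:
--             if line.strip():
--                 data_lines.append(line)
--
--     return meta_lines, header_line, data_lines
-- ===== SOURCE B (Python) =====
-- from typing import Optional
--
-- def _split_tab_lines(lines: list[str]) -> tuple[list[str], Optional[str], list[str]]:
--     """Split raw tab-file lines into (meta_lines, header_line, data_lines)."""
--     idx = next((i for i, l in enumerate(lines) if l.strip() == "*/"), None)
--     if idx is None:
--         return lines, None, []
--     nonempty = [l for l in lines[idx + 1:] if l.strip()]
--     if not nonempty:
--         return lines[:idx], None, []
--     return lines[:idx], nonempty[0], nonempty[1:]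
-- ===== Notes on version B (the rewrite author's own statement) =====
-- stated objective: simpler
-- what changed: Replaces A's single-pass in_meta/header state machine with a locate-the-'*/'-delimiter split (slice before/after the first delimiter, then filter the tail once and take head/tail as header/data).
import Mathlib
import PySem

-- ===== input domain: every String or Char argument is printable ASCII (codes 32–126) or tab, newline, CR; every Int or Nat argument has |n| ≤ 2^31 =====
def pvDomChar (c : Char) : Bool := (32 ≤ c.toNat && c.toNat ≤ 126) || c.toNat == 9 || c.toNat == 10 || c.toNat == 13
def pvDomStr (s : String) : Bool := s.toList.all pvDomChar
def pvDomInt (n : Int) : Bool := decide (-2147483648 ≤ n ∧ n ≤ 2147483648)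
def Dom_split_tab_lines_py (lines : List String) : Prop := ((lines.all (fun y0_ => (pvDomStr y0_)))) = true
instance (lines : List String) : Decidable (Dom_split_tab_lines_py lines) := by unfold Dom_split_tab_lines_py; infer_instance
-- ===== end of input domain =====

-- B replaces A's in_meta state machine by "find the first '*/' line, slice, filter once" (simpler decomposition, same cost).

-- ===== PORT A =====
-- A's loop as structural recursion over the same state (meta_lines, header_line, data_lines, in_meta)
def splitTabGoA : List String → List String → Option String → List String → Bool →
    List String × Option String × List String
  | [], acc, header, data, _ => (acc, header, data)
  | line :: rest, acc, header, data, inMeta =>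
    if inMeta then
      if PySem.Str.strip line = "*/" then splitTabGoA rest acc header data false
      else splitTabGoA rest (acc ++ [line]) header data true
    else match header with
      | none =>
        if PySem.Str.strip line ≠ "" then splitTabGoA rest acc (some line) data false
        else splitTabGoA rest acc none data false
      | some h =>
        if PySem.Str.strip line ≠ "" then splitTabGoA rest acc (some h) (data ++ [line]) false
        else splitTabGoA rest acc (some h) data false

def split_tab_lines_py (lines : List String) : List String × Option String × List String :=
  splitTabGoA lines [] none [] true

-- ===== PORT B =====
def split_tab_lines_py_alt (lines : List String) : List String × Option String × List String :=
  let isDelim : String → Bool := fun l => PySem.Str.strip l = "*/"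
  match lines.dropWhile (fun l => !(isDelim l)) with
  | [] => (lines, none, [])
  | _ :: tail =>
    let acc := lines.takeWhile (fun l => !(isDelim l))
    match tail.filter (fun l => PySem.Str.strip l ≠ "") with
    | [] => (acc, none, [])
    | h :: d => (acc, some h, d)

-- ===== PRECONDITION & SPEC =====
def Spec_split_tab_lines_py (lines : List String) (out : List String × Option String × List String) : Prop := out = split_tab_lines_py_alt lines
instance (lines : List String) (out : List String × Option String × List String) : Decidable (Spec_split_tab_lines_py lines out) := by unfold Spec_split_tab_lines_py; infer_instance

-- ===== CLAIM (what is proved, stated in full; the proofs are below) =====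
def Claim_equal_split_tab_lines_py : Prop := ∀ (lines : List String), Dom_split_tab_lines_py lines → Spec_split_tab_lines_py lines (split_tab_lines_py lines)

-- ===== LEMMAS AND PROOFS =====

-- phase 3: header already found; remaining truthy lines are appended to data
lemma goA_some (ls acc data : List String) (h : String) :
    splitTabGoA ls acc (some h) data false
      = (acc, some h, data ++ ls.filter (fun l => PySem.Str.strip l ≠ "")) := by
  induction ls generalizing data with
  | nil => simp [splitTabGoA]
  | cons l rest ih =>
    by_cases hl : PySem.Str.strip l ≠ ""
    · simp [splitTabGoA, hl, ih]
    · simp [splitTabGoA, hl, ih]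

-- phase 2: after the delimiter, header not yet found and data empty
lemma goA_none (ls acc : List String) :
    splitTabGoA ls acc none [] false
      = (acc,
          match ls.filter (fun l => PySem.Str.strip l ≠ "") with
          | [] => (none, [])
          | h :: d => (some h, d)) := by
  induction ls with
  | nil => simp [splitTabGoA]
  | cons l rest ih =>
    by_cases hl : PySem.Str.strip l ≠ ""
    · simp [splitTabGoA, hl, goA_some]
    · simp [splitTabGoA, hl, ih]

-- phase 1: in the acc section
lemma goA_acc (ls acc : List String) :
    splitTabGoA ls acc none [] true
      = match ls.dropWhile (fun l => !(decide (PySem.Str.strip l = "*/"))) with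
        | [] => (acc ++ ls, none, [])
        | _ :: tail =>
          (acc ++ ls.takeWhile (fun l => !(decide (PySem.Str.strip l = "*/"))),
            match tail.filter (fun l => PySem.Str.strip l ≠ "") with
            | [] => (none, [])
            | h :: d => (some h, d)) := by
  induction ls generalizing acc with
  | nil => simp [splitTabGoA]
  | cons l rest ih =>
    by_cases hl : PySem.Str.strip l = "*/"
    · simp [splitTabGoA, hl, goA_none, List.dropWhile, List.takeWhile]
    · rw [show splitTabGoA (l :: rest) acc none [] true
            = splitTabGoA rest (acc ++ [l]) none [] true from by simp [splitTabGoA, hl]]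
      rw [ih (acc ++ [l]), List.dropWhile_cons, List.takeWhile_cons]
      cases hd : rest.dropWhile (fun l => !(decide (PySem.Str.strip l = "*/"))) <;>
        simp [hl]

-- a pair whose second component is a match commutes with the match
lemma pair_match (m r : List String) :
    ((m, match r with
          | [] => ((none : Option String), ([] : List String))
          | h :: d => (some h, d)) : List String × Option String × List String)
      = match r with
        | [] => (m, none, [])
        | h :: d => (m, some h, d) := by
  cases r <;> rfl

-- ===== VERDICT (by name: the statement is the Claim_ definition above) =====
theorem split_tab_lines_py_spec : Claim_equal_split_tab_lines_py := by
  intro lines _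
  unfold Spec_split_tab_lines_py split_tab_lines_py split_tab_lines_py_alt
  rw [goA_acc]
  simp only [List.nil_append, pair_match]
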